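-- pv_equiv track=rewrite | github.com/callmateteam/eo_BE | app/services/prompt_optimizer.py | select_best_image
-- ===== SOURCE A (Python) =====
-- def select_best_image(
--     extra_images: str,
--     scene_type: str,
--     base_image_url: str,
-- ) -> str:
--     """장면 유형에 맞는 최적 S3 이미지 자동 선택"""
--     if not extra_images:
--         return base_image_url
--
--     images = [img.strip() for img in extra_images.split(",") if img.strip()]
--     base_dir = base_image_url.rsplit("/", 1)[0]
--
--     preferred: dict[str, list[str]] = {
--         "cooking": ["cooking", "fullbody", "action", "side"],
--         "eating": ["eating", "face", "side"],
--         "walking": ["fullbody", "walking", "side", "action"],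
--         "action": ["action", "fullbody", "side"],
--         "sitting": ["sitting", "face", "fullbody", "side"],
--         "talking": ["face", "talking", "fullbody", "side"],
--         "default": ["fullbody", "face", "side"],
--     }
--
--     pref_list = preferred.get(scene_type, preferred["default"])
--
--     for pref in pref_list:
--         for img in images:
--             if pref in img.lower():
--                 return f"{base_dir}/{img}"
--
--     if images:
--         return f"{base_dir}/{images[0]}"
--     return base_image_url
-- ===== SOURCE B (Python) =====
-- def _prefs_for(scene_type):
--     if scene_type == "cooking":
--         return ["cooking", "fullbody", "action", "side"]
--     elif scene_type == "eating":
--         return ["eating", "face", "side"]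
--     elif scene_type == "walking":
--         return ["fullbody", "walking", "side", "action"]
--     elif scene_type == "action":
--         return ["action", "fullbody", "side"]
--     elif scene_type == "sitting":
--         return ["sitting", "face", "fullbody", "side"]
--     elif scene_type == "talking":
--         return ["face", "talking", "fullbody", "side"]
--     else:
--         return ["fullbody", "face", "side"]
--
--
-- def _rank(low, prefs):
--     for i, p in enumerate(prefs):
--         if p in low:
--             return i
--     return len(prefs)
--
--
-- def select_best_image(extra_images, scene_type, base_image_url):
--     if not extra_images:
--         return base_image_url
--     images = [img.strip() for img in extra_images.split(",") if img.strip()]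
--     if not images:
--         return base_image_url
--     base_dir = base_image_url.rsplit("/", 1)[0]
--     prefs = _prefs_for(scene_type)
--     best_rank, best_img = _rank(images[0].lower(), prefs), images[0]
--     for img in images[1:]:
--         r = _rank(img.lower(), prefs)
--         if r < best_rank:
--             best_rank, best_img = r, img
--     return f"{base_dir}/{best_img}"
-- ===== Notes on version B (the rewrite author's own statement) =====
-- stated objective: alternative
-- what changed: A's preference-first nested scan (for each preference, rescan all images) is replaced by a single pass over the images that computes each image's preference rank once (lowercasing it once) and keeps a running best of (lowest rank, earliest index); the no-match fallback to images[0] falls out of the same scan.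
import Mathlib
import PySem

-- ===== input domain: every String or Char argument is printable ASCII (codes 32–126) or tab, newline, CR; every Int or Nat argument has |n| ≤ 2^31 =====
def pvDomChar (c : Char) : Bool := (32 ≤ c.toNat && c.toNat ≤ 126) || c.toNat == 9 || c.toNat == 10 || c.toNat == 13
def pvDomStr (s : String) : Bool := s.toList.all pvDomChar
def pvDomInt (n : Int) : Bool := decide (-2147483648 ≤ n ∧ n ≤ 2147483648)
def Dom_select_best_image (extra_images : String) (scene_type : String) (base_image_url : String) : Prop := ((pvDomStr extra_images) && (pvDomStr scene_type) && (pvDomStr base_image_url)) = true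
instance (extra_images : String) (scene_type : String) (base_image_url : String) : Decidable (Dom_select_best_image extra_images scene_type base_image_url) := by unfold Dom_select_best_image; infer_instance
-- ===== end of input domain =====

-- B replaces A's preference-first nested scan by a single pass over the images keeping a
-- running best (preference rank, image); objective: alternative decomposition, same cost.

-- shared preprocessing helpers (identical lines in both Pythons):
-- base_image_url.rsplit("/", 1)[0], ported by hand via rfind (exact: all before the
-- last "/", or the whole string if "/" does not occur)
def pvBaseDir (s : String) : String :=
  let i := PySem.Str.rfind s "/"
  if i = -1 then s else PySem.Str.slice s none (some i)

-- [img.strip() for img in extra_images.split(",") if img.strip()]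
def pvImages (extra_images : String) : List String :=
  (((PySem.Str.split? extra_images ",").getD []).filter
      (fun img => !(PySem.Str.strip img == ""))).map PySem.Str.strip

-- ===== PORT A =====
-- inner loop: for img in images: if pref in img.lower(): return img
def pvFindImg (p : String) : List String → Option String
  | [] => none
  | img :: rest =>
      if PySem.Str.isIn p (PySem.Str.lower img) then some img else pvFindImg p rest

-- outer loop over pref_list
def pvLoopA (prefs images : List String) : Option String :=
  match prefs with
  | [] => none
  | p :: ps =>
      match pvFindImg p images with
      | some img => some img
      | none => pvLoopA ps images

def select_best_image (extra_images : String) (scene_type : String) (base_image_url : String) : String :=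
  if extra_images = "" then base_image_url
  else
    let images := pvImages extra_images
    let base_dir := pvBaseDir base_image_url
    let preferred : PySem.Dict String (List String) := PySem.Dict.ofList
      [ ("cooking", ["cooking", "fullbody", "action", "side"])
      , ("eating", ["eating", "face", "side"])
      , ("walking", ["fullbody", "walking", "side", "action"])
      , ("action", ["action", "fullbody", "side"])
      , ("sitting", ["sitting", "face", "fullbody", "side"])
      , ("talking", ["face", "talking", "fullbody", "side"])
      , ("default", ["fullbody", "face", "side"]) ]
    let pref_list := PySem.Dict.getD preferred scene_type (PySem.Dict.getD preferred "default" [])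
    match pvLoopA pref_list images with
    | some img => base_dir ++ "/" ++ img
    | none =>
        match images with
        | img0 :: _ => base_dir ++ "/" ++ img0
        | [] => base_image_url

-- ===== PORT B =====
def pvPrefsFor (scene_type : String) : List String :=
  if scene_type = "cooking" then ["cooking", "fullbody", "action", "side"]
  else if scene_type = "eating" then ["eating", "face", "side"]
  else if scene_type = "walking" then ["fullbody", "walking", "side", "action"]
  else if scene_type = "action" then ["action", "fullbody", "side"]
  else if scene_type = "sitting" then ["sitting", "face", "fullbody", "side"]
  else if scene_type = "talking" then ["face", "talking", "fullbody", "side"]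
  else ["fullbody", "face", "side"]

-- _rank: smallest index whose preference occurs in the lowered image name, else len(prefs)
def pvRank (prefs : List String) (low : String) : Nat :=
  match prefs with
  | [] => 0
  | p :: ps => if PySem.Str.isIn p low then 0 else pvRank ps low + 1

-- one step of B's running-best scan
def pvStep (prefs : List String) (acc : Nat × String) (img : String) : Nat × String :=
  let r := pvRank prefs (PySem.Str.lower img)
  if r < acc.1 then (r, img) else acc

def select_best_image_alt (extra_images : String) (scene_type : String) (base_image_url : String) : String :=
  if extra_images = "" then base_image_url
  else
    match pvImages extra_images with
    | [] => base_image_url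
    | img0 :: rest =>
        let base_dir := pvBaseDir base_image_url
        let prefs := pvPrefsFor scene_type
        let best := rest.foldl (pvStep prefs) (pvRank prefs (PySem.Str.lower img0), img0)
        base_dir ++ "/" ++ best.2

-- ===== PRECONDITION & SPEC =====
def Spec_select_best_image (extra_images : String) (scene_type : String) (base_image_url : String) (out : String) : Prop := out = select_best_image_alt extra_images scene_type base_image_url
instance (extra_images : String) (scene_type : String) (base_image_url : String) (out : String) : Decidable (Spec_select_best_image extra_images scene_type base_image_url out) := by unfold Spec_select_best_image; infer_instance

-- ===== CLAIM (what is proved, stated in full; the proofs are below) =====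
def Claim_equal_select_best_image : Prop := ∀ (extra_images : String) (scene_type : String) (base_image_url : String), Dom_select_best_image extra_images scene_type base_image_url → Spec_select_best_image extra_images scene_type base_image_url (select_best_image extra_images scene_type base_image_url)

-- ===== LEMMAS AND PROOFS =====

-- head-first arg-min over the images (proof-only middle ground between the two ports)
def pvAm (prefs : List String) : List String → Option (Nat × String)
  | [] => none
  | x :: xs =>
      some (match pvAm prefs xs with
            | none => (pvRank prefs (PySem.Str.lower x), x)
            | some b =>
                if b.1 < pvRank prefs (PySem.Str.lower x) then b
                else (pvRank prefs (PySem.Str.lower x), x))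

theorem pvRank_le (prefs : List String) (low : String) : pvRank prefs low ≤ prefs.length := by
  induction prefs with
  | nil => simp [pvRank]
  | cons p ps ih => simp only [pvRank, List.length_cons]; split <;> omega

theorem pvFindImg_none {p : String} : ∀ {l : List String}, pvFindImg p l = none →
    ∀ i ∈ l, PySem.Str.isIn p (PySem.Str.lower i) = false := by
  intro l
  induction l with
  | nil => intro _ i hi; simp at hi
  | cons h t iht =>
      intro hf i hi
      simp only [pvFindImg] at hf
      by_cases hc : PySem.Str.isIn p (PySem.Str.lower h) = true
      · rw [if_pos hc] at hf; exact absurd hf (by simp)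
      · rw [if_neg hc] at hf
        rcases List.mem_cons.mp hi with hi | hi
        · subst hi; simpa using hc
        · exact iht hf i hi

theorem pvFold_eq_am (prefs : List String) (xs : List String) :
    ∀ acc, xs.foldl (pvStep prefs) acc =
      (match pvAm prefs xs with
       | none => acc
       | some b => if b.1 < acc.1 then b else acc) := by
  induction xs with
  | nil => intro acc; simp [pvAm]
  | cons x t ih =>
      intro acc
      simp only [List.foldl_cons, ih, pvAm]
      cases hb : pvAm prefs t with
      | none => simp only [pvStep]
      | some b =>
          simp only [pvStep]
          rcases acc with ⟨a1, a2⟩; rcases b with ⟨b1, b2⟩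
          by_cases h1 : b1 < pvRank prefs (PySem.Str.lower x) <;>
            simp only [h1, if_true, if_false] <;>
            split_ifs <;> simp_all <;> omega

theorem pvLoopA_eq_am (prefs images : List String) :
    pvLoopA prefs images =
      (match pvAm prefs images with
       | none => none
       | some b => if b.1 < prefs.length then some b.2 else none) := by
  induction prefs with
  | nil =>
      cases him : pvAm [] images with
      | none => simp [pvLoopA]
      | some b => simp [pvLoopA]
  | cons p ps ih =>
      cases hf : pvFindImg p images with
      | some img =>
          -- first image containing p has rank 0 and wins the arg-min
          have key : ∀ (l : List String) (x : String), pvFindImg p l = some x →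
              pvAm (p :: ps) l = some (0, x) := by
            intro l
            induction l with
            | nil => intro x hx; simp [pvFindImg] at hx
            | cons h t iht =>
                intro x hx
                simp only [pvFindImg] at hx
                by_cases hc : PySem.Str.isIn p (PySem.Str.lower h) = true
                · rw [if_pos hc] at hx
                  injection hx with hx
                  subst hx
                  simp only [pvAm, pvRank, hc, if_true]
                  cases pvAm (p :: ps) t <;> simp
                · rw [if_neg hc] at hx
                  have := iht x hx
                  simp only [pvAm, this, pvRank, hc]
                  simp
          simp only [pvLoopA, hf, key images img hf]
          simp
      | none =>
          -- no image contains p: every rank shifts by one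
          have hall : ∀ i ∈ images, PySem.Str.isIn p (PySem.Str.lower i) = false :=
            pvFindImg_none hf
          have shift : ∀ (l : List String), (∀ i ∈ l, PySem.Str.isIn p (PySem.Str.lower i) = false) →
              pvAm (p :: ps) l = (pvAm ps l).map (fun b => (b.1 + 1, b.2)) := by
            intro l
            induction l with
            | nil => intro _; simp [pvAm]
            | cons h t iht =>
                intro hl
                have hh := hl h (by simp)
                have ht := iht (fun i hi => hl i (by simp [hi]))
                simp only [pvAm, ht, pvRank, hh]
                cases hb : pvAm ps t with
                | none => simp
                | some b =>
                    simp only [Option.map_some, Option.some.injEq]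
                    split_ifs <;> simp_all <;> omega
          simp only [pvLoopA, hf, ih, shift images hall]
          cases hb : pvAm ps images with
          | none => simp
          | some b =>
              simp only [Option.map_some, List.length_cons]
              split_ifs <;> simp_all <;> omega

theorem pvAm_cons (prefs : List String) (h : String) (t : List String) :
    pvAm prefs (h :: t) =
      some (match pvAm prefs t with
            | none => (pvRank prefs (PySem.Str.lower h), h)
            | some b =>
                if b.1 < pvRank prefs (PySem.Str.lower h) then b
                else (pvRank prefs (PySem.Str.lower h), h)) := rfl

theorem pvPrefs_eq (scene_type : String) :
    PySem.Dict.getD (PySem.Dict.ofList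
      [ ("cooking", ["cooking", "fullbody", "action", "side"])
      , ("eating", ["eating", "face", "side"])
      , ("walking", ["fullbody", "walking", "side", "action"])
      , ("action", ["action", "fullbody", "side"])
      , ("sitting", ["sitting", "face", "fullbody", "side"])
      , ("talking", ["face", "talking", "fullbody", "side"])
      , ("default", ["fullbody", "face", "side"]) ]) scene_type
      (PySem.Dict.getD (PySem.Dict.ofList
      [ ("cooking", ["cooking", "fullbody", "action", "side"])
      , ("eating", ["eating", "face", "side"])
      , ("walking", ["fullbody", "walking", "side", "action"])
      , ("action", ["action", "fullbody", "side"])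
      , ("sitting", ["sitting", "face", "fullbody", "side"])
      , ("talking", ["face", "talking", "fullbody", "side"])
      , ("default", ["fullbody", "face", "side"]) ]) "default" [])
    = pvPrefsFor scene_type := by
  have hitems : (PySem.Dict.ofList
      [ ("cooking", ["cooking", "fullbody", "action", "side"])
      , ("eating", ["eating", "face", "side"])
      , ("walking", ["fullbody", "walking", "side", "action"])
      , ("action", ["action", "fullbody", "side"])
      , ("sitting", ["sitting", "face", "fullbody", "side"])
      , ("talking", ["face", "talking", "fullbody", "side"])
      , ("default", ["fullbody", "face", "side"]) ] : PySem.Dict String (List String)).items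
      = [ ("cooking", ["cooking", "fullbody", "action", "side"])
      , ("eating", ["eating", "face", "side"])
      , ("walking", ["fullbody", "walking", "side", "action"])
      , ("action", ["action", "fullbody", "side"])
      , ("sitting", ["sitting", "face", "fullbody", "side"])
      , ("talking", ["face", "talking", "fullbody", "side"])
      , ("default", ["fullbody", "face", "side"]) ] := by decide
  set_option maxRecDepth 4096 in
  simp only [PySem.Dict.getD, PySem.Dict.get?, hitems, pvPrefsFor, List.find?]
  split_ifs with g1 g2 g3 g4 g5 g6
  · subst g1; rfl
  · subst g2; rfl
  · subst g3; rfl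
  · subst g4; rfl
  · subst g5; rfl
  · subst g6; rfl
  · 
    have e1 : ("cooking" == scene_type) = false := beq_eq_false_iff_ne.mpr (fun h => g1 h.symm)
    have e2 : ("eating" == scene_type) = false := beq_eq_false_iff_ne.mpr (fun h => g2 h.symm)
    have e3 : ("walking" == scene_type) = false := beq_eq_false_iff_ne.mpr (fun h => g3 h.symm)
    have e4 : ("action" == scene_type) = false := beq_eq_false_iff_ne.mpr (fun h => g4 h.symm)
    have e5 : ("sitting" == scene_type) = false := beq_eq_false_iff_ne.mpr (fun h => g5 h.symm)
    have e6 : ("talking" == scene_type) = false := beq_eq_false_iff_ne.mpr (fun h => g6 h.symm)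
    simp only [e1, e2, e3, e4, e5, e6]
    by_cases g7 : scene_type = "default"
    · subst g7; rfl
    · have e7 : ("default" == scene_type) = false := beq_eq_false_iff_ne.mpr (fun h => g7 h.symm)
      simp only [e7]
      rfl

-- ===== VERDICT (by name: the statement is the Claim_ definition above) =====
theorem select_best_image_spec : Claim_equal_select_best_image := by
  intro extra_images scene_type base_image_url _
  unfold Spec_select_best_image
  unfold select_best_image select_best_image_alt
  by_cases he : extra_images = ""
  · simp [he]
  · simp only [he, reduceIte]
    rw [pvPrefs_eq]
    set prefs := pvPrefsFor scene_type with hp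
    cases him : pvImages extra_images with
    | nil => simp [pvLoopA_eq_am, pvAm]
    | cons img0 rest =>
        simp only
        rw [pvFold_eq_am, pvLoopA_eq_am, pvAm_cons]
        cases hm : pvAm prefs rest with
        | none =>
            simp only
            split_ifs with h1 <;> rfl
        | some b =>
            simp only
            have hle := pvRank_le prefs (PySem.Str.lower img0)
            split_ifs with h1 h2 h2 <;> first | rfl | (exfalso; omega)
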